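-- pv_equiv track=rewrite | github.com/bipentihexium/wys_arg_tools | wys_lib.py | humanscantsolvethis_encrypt
-- ===== SOURCE A (Python) =====
-- def humanscantsolvethis_encrypt(data:str, key:str="HUMANSCANTSOLVETHISSOBETTERSTOPHERE") -> str:
-- 	"""encrypts data using the HCSTSBSH algorithm (key defaults to HUMANSCANTSOLVE...)"""
-- 	key = [ord(c)-64 for c in key]
-- 	keyindex = 0
-- 	index = 0
-- 	result = "-" * len(data)
-- 	places = [i for i in range(len(result))]
-- 	for char in data:
-- 		index = (index + key[keyindex]) % len(places)
-- 		keyindex = (keyindex + 1) % len(key)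
-- 		result = result[:places[index]] + char + result[places[index]+1:]
-- 		del places[index]
-- 	return result
-- ===== SOURCE B (Python) =====
-- def humanscantsolvethis_encrypt(data: str, key: str = "HUMANSCANTSOLVETHISSOBETTERSTOPHERE") -> str:
--     """encrypts data using the HCSTSBSH algorithm (key defaults to HUMANSCANTSOLVE...)
--
--     Free slots are kept in an order-statistic segment tree (count-augmented binary
--     tree over slot indices): selecting and deleting the k-th remaining free slot is
--     O(log n) instead of A's O(n) list indexing/deletion and O(n) string rebuild.
--     """
--     n = len(data)
--     ks = [ord(c) - 64 for c in key]
--     out = [None] * n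
--
--     def build(lo, hi):
--         # tree over slots lo..hi-1; leaf = (1, value), node = (count, left, right)
--         if hi - lo == 1:
--             return (1, lo)
--         mid = (lo + hi) // 2
--         return (hi - lo, build(lo, mid), build(mid, hi))
--
--     def pick(t, k):
--         # returns (k-th present slot of t, t with that slot removed)
--         if len(t) == 2:
--             return t[1], (0, t[1])
--         cnt, l, r = t
--         if k < l[0]:
--             v, l2 = pick(l, k)
--             return v, (cnt - 1, l2, r)
--         v, r2 = pick(r, k - l[0])
--         return v, (cnt - 1, l, r2)
--
--     if n:
--         t = build(0, n)
--         index = 0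
--         rem = n
--         for i, ch in enumerate(data):
--             index = (index + ks[i % len(ks)]) % rem
--             slot, t = pick(t, index)
--             out[slot] = ch
--             rem -= 1
--     return "".join(out)
-- ===== Notes on version B (the rewrite author's own statement) =====
-- stated objective: faster
-- what changed: Replaces A's O(n) list indexing+deletion of free slots and O(n)-per-step string rebuilding with a count-augmented binary tree (order-statistic segment tree) that selects and deletes the k-th remaining free slot in O(log n), writing each character into a preallocated array joined once.
import Mathlib
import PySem

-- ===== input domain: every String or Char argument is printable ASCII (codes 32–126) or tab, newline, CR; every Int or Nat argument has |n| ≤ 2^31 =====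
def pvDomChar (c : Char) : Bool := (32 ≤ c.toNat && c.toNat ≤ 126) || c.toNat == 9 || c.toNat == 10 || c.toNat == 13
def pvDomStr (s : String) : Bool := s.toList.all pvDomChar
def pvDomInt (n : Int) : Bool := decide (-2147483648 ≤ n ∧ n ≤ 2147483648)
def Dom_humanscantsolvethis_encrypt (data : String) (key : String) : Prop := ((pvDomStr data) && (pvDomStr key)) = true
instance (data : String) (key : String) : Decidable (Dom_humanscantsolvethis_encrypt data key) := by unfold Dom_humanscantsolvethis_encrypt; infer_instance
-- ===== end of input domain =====

-- B replaces A's quadratic free-slot list deletion + per-step string rebuilding by an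
-- order-statistic tree and a preallocated output array (O(n log n)); A = B is proved on Pre_.

-- ===== PORT A =====
-- loop body of A: state = (keyindex, index, places, result); the Python str result is List Char
def pvStepA (keyL : List Int) (st : Int × Int × List Int × List Char) (char : Char) :
    Int × Int × List Int × List Char :=
  match st with
  | (keyindex, index, places, result) =>
    let index := PySem.Int.mod (index + PySem.List.pyGetD keyL keyindex 0) (PySem.List.len places)
    let keyindex := PySem.Int.mod (keyindex + 1) (PySem.List.len keyL)
    let p := PySem.List.pyGetD places index 0
    let result := PySem.List.slice result none (some p) ++ [char] ++
                  PySem.List.slice result (some (p + 1)) none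
    let places := ((PySem.List.pop? places index).getD (0, places)).2
    (keyindex, index, places, result)

def humanscantsolvethis_encrypt (data : String) (key : String) : String :=
  let keyL := key.toList.map (fun c => (c.toNat : Int) - 64)   -- [ord(c)-64 for c in key]
  let result := PySem.List.pyRepeat ['-'] (PySem.Str.len data)  -- "-" * len(data)
  let places := PySem.List.pyRange 0 (PySem.List.len result) 1  -- [i for i in range(len(result))]
  let fin := data.toList.foldl (pvStepA keyL) (0, 0, places, result)
  String.ofList fin.2.2.2

-- ===== PORT B =====
-- count-augmented binary tree over slot indices; Python tuples (cnt, v) / (cnt, l, r)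
inductive PvTree where
  | leaf (cnt : Int) (v : Int)
  | node (cnt : Int) (l : PvTree) (r : PvTree)
deriving Repr, DecidableEq
def PvTree.count : PvTree → Int
  | .leaf c _ => c
  | .node c _ _ => c

-- build(lo, hi); the hi ≤ lo guard only makes the recursion total (B's Python never calls it so)
def pvBuild (lo hi : Int) : PvTree :=
  if hi - lo = 1 then .leaf 1 lo
  else if hi ≤ lo then .leaf 1 lo
  else
    .node (hi - lo) (pvBuild lo (PySem.Int.floordiv (lo + hi) 2))
                    (pvBuild (PySem.Int.floordiv (lo + hi) 2) hi)
termination_by (hi - lo).toNat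
decreasing_by
  all_goals rw [PySem.Int.floordiv_eq_ediv_of_pos (by norm_num)]; omega

def pvPick : PvTree → Int → Int × PvTree
  | .leaf _ v, _ => (v, .leaf 0 v)
  | .node cnt l r, k =>
    if k < l.count then
      let res := pvPick l k
      (res.1, .node (cnt - 1) res.2 r)
    else
      let res := pvPick r (k - l.count)
      (res.1, .node (cnt - 1) l res.2)

-- loop body of B: state = (index, tree, out, rem)
def pvStepB (ks : List Int) (st : Int × PvTree × List (Option Char) × Int) (p : Int × Char) :
    Int × PvTree × List (Option Char) × Int :=
  match st with
  | (index, t, out, rem) =>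
    let index := PySem.Int.mod (index + PySem.List.pyGetD ks (PySem.Int.mod p.1 (PySem.List.len ks)) 0) rem
    let res := pvPick t index
    let out := PySem.List.pySetD out res.1 (some p.2)
    (index, res.2, out, rem - 1)

-- "".join(out): in B every slot is filled before the join, so the Option default is never read
def humanscantsolvethis_encrypt_alt (data : String) (key : String) : String :=
  let n := data.toList.length
  let ks := key.toList.map (fun c => (c.toNat : Int) - 64)
  let out : List (Option Char) := List.replicate n none
  if n = 0 then String.ofList (out.map (fun o => o.getD '-'))
  else
    let fin := (PySem.List.enumerate data.toList 0).foldl (pvStepB ks)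
      (0, pvBuild 0 (n : Int), out, (n : Int))
    String.ofList (fin.2.2.1.map (fun o => o.getD '-'))

-- ===== PRECONDITION & SPEC =====
-- Pre_ excludes exactly the inputs with an empty key and nonempty data: there A raises
-- IndexError (key[keyindex]) and B raises ZeroDivisionError (i % len(ks)); A returns on
-- every input Pre_ admits.
def Pre_humanscantsolvethis_encrypt (data : String) (key : String) : Prop :=
  data = "" ∨ key ≠ ""
instance (data : String) (key : String) : Decidable (Pre_humanscantsolvethis_encrypt data key) := by
  unfold Pre_humanscantsolvethis_encrypt; infer_instance

def pvWitness_humanscantsolvethis_encrypt : String × String := ("hello world", "KEY")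

def Spec_humanscantsolvethis_encrypt (data : String) (key : String) (out : String) : Prop :=
  out = humanscantsolvethis_encrypt_alt data key
instance (data : String) (key : String) (out : String) : Decidable (Spec_humanscantsolvethis_encrypt data key out) := by
  unfold Spec_humanscantsolvethis_encrypt; infer_instance

-- ===== CLAIM (what is proved, stated in full; the proofs are below) =====
def Claim_equal_humanscantsolvethis_encrypt : Prop :=
  ∀ (data : String) (key : String), Dom_humanscantsolvethis_encrypt data key →
    Pre_humanscantsolvethis_encrypt data key →
    Spec_humanscantsolvethis_encrypt data key (humanscantsolvethis_encrypt data key)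

-- ===== LEMMAS AND PROOFS =====

-- the list of still-free slots a tree represents, in order, and its well-formedness
def PvTree.toSlots : PvTree → List Int
  | .leaf c v => if c = 1 then [v] else []
  | .node _ l r => l.toSlots ++ r.toSlots

def PvTree.ok : PvTree → Prop
  | .leaf c _ => c = 0 ∨ c = 1
  | .node c l r => c = l.count + r.count ∧ l.ok ∧ r.ok

lemma pvTree_count_eq (t : PvTree) (h : t.ok) : t.count = (t.toSlots.length : Int) := by
  induction t with
  | leaf c v => rcases h with h | h <;> simp [PvTree.count, PvTree.toSlots, h]
  | node c l r ihl ihr =>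
    obtain ⟨hc, hl, hr⟩ := h
    show c = _
    rw [hc, ihl hl, ihr hr, PvTree.toSlots]
    push_cast [List.length_append]; ring

lemma pvBuild_spec (lo hi : Int) (h : lo < hi) :
    (pvBuild lo hi).toSlots = PySem.List.pyRange lo hi 1 ∧ (pvBuild lo hi).ok ∧
    (pvBuild lo hi).count = hi - lo := by
  fun_induction pvBuild lo hi with
  | case1 lo hi h1 =>
    refine ⟨?_, Or.inr rfl, by simp [PvTree.count]; omega⟩
    have : hi = lo + 1 := by omega
    subst this
    simp [PvTree.toSlots, PySem.List.pyRange_one_singleton]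
  | case2 lo hi h1 h2 => omega
  | case3 lo hi h1 h2 ihl ihr =>
    have hmid : lo < PySem.Int.floordiv (lo + hi) 2 ∧ PySem.Int.floordiv (lo + hi) 2 < hi := by
      rw [PySem.Int.floordiv_eq_ediv_of_pos (by norm_num)]; omega
    obtain ⟨h3, h4⟩ := hmid
    obtain ⟨il1, il2, il3⟩ := ihl h3
    obtain ⟨ir1, ir2, ir3⟩ := ihr h4
    refine ⟨?_, ⟨by rw [il3, ir3]; ring, il2, ir2⟩, rfl⟩
    rw [PvTree.toSlots, il1, ir1,
      PySem.List.pyRange_one_append lo _ hi (le_of_lt h3) (le_of_lt h4)]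

lemma pvPick_spec (t : PvTree) (k : Int) (hok : t.ok) (h0 : 0 ≤ k) (hk : k < t.count) :
    ∃ (hlt : k.toNat < t.toSlots.length),
      (pvPick t k).1 = t.toSlots[k.toNat] ∧
      (pvPick t k).2.toSlots = t.toSlots.eraseIdx k.toNat ∧
      (pvPick t k).2.ok ∧ (pvPick t k).2.count = t.count - 1 := by
  induction t generalizing k with
  | leaf c v =>
    have hc1 : c = 1 := by
      rcases hok with h | h
      · subst h; simp [PvTree.count] at hk; omega
      · exact h
    have hk0 : k = 0 := by
      subst hc1; simp [PvTree.count] at hk; omega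
    subst hc1 hk0
    refine ⟨by simp [PvTree.toSlots], ?_, ?_, Or.inl rfl, rfl⟩ <;> simp [pvPick, PvTree.toSlots]
  | node c l r ihl ihr =>
    obtain ⟨hc, hl, hr⟩ := hok
    have hlc : l.count = (l.toSlots.length : Int) := pvTree_count_eq l hl
    have hrc : r.count = (r.toSlots.length : Int) := pvTree_count_eq r hr
    have hkc : k < l.count + r.count := by
      have : (PvTree.node c l r).count = c := rfl
      omega
    have hslots : (PvTree.node c l r).toSlots = l.toSlots ++ r.toSlots := rfl
    by_cases hcase : k < l.count
    · obtain ⟨hklen, hv, he, hok2, hcnt⟩ := ihl k hl h0 hcase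
      have hP1 : (pvPick (.node c l r) k).1 = (pvPick l k).1 := by simp [pvPick, hcase]
      have hP2 : (pvPick (.node c l r) k).2 = .node (c-1) (pvPick l k).2 r := by
        simp [pvPick, hcase]
      refine ⟨by show k.toNat < (l.toSlots ++ r.toSlots).length; simp; omega, ?_, ?_, ?_, ?_⟩
      · rw [hP1, hv]
        exact (List.getElem_append_left hklen).symm
      · rw [hP2]
        show (pvPick l k).2.toSlots ++ r.toSlots = (l.toSlots ++ r.toSlots).eraseIdx k.toNat
        rw [he, List.eraseIdx_append_of_lt_length hklen]
      · rw [hP2]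
        exact ⟨by rw [hcnt]; omega, hok2, hr⟩
      · rw [hP2]; rfl
    · have h02 : 0 ≤ k - l.count := by omega
      have hk2 : k - l.count < r.count := by omega
      obtain ⟨hklen, hv, he, hok2, hcnt⟩ := ihr (k - l.count) hr h02 hk2
      have hlen : l.toSlots.length ≤ k.toNat := by omega
      have htn : (k - l.count).toNat = k.toNat - l.toSlots.length := by omega
      have hP1 : (pvPick (.node c l r) k).1 = (pvPick r (k - l.count)).1 := by
        simp [pvPick, hcase]
      have hP2 : (pvPick (.node c l r) k).2 = .node (c-1) l (pvPick r (k - l.count)).2 := by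
        simp [pvPick, hcase]
      refine ⟨by show k.toNat < (l.toSlots ++ r.toSlots).length; simp; omega, ?_, ?_, ?_, ?_⟩
      · rw [hP1, hv]
        simp only [htn]
        exact (List.getElem_append_right hlen).symm
      · rw [hP2]
        show l.toSlots ++ (pvPick r (k - l.count)).2.toSlots
            = (l.toSlots ++ r.toSlots).eraseIdx k.toNat
        rw [he, htn, List.eraseIdx_append_of_length_le hlen]
      · rw [hP2]
        exact ⟨by rw [hcnt]; omega, hl, hok2⟩
      · rw [hP2]; rfl

lemma pvMod_succ (i : Nat) (L : Int) (hL : 0 < L) :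
    PySem.Int.mod (PySem.Int.mod (i : Int) L + 1) L = PySem.Int.mod ((i + 1 : Nat) : Int) L := by
  rw [PySem.Int.mod_eq_emod_of_pos hL, PySem.Int.mod_eq_emod_of_pos hL,
      PySem.Int.mod_eq_emod_of_pos hL]
  have h2 : (i : Int) % L + 1 + L * ((i : Int) / L) = ((i + 1 : Nat) : Int) := by
    have := Int.emod_add_mul_ediv (i : Int) L
    push_cast; linarith
  rw [← h2, Int.add_mul_emod_self_left]

-- main invariant: A's loop state and B's loop state stay in lockstep
lemma pvLoop_eq (keyL : List Int) (hK : keyL ≠ []) :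
    ∀ (cs : List Char) (i : Nat) (idx : Int) (places : List Int)
      (out : List (Option Char)) (t : PvTree),
      t.ok → t.toSlots = places →
      cs.length = places.length →
      (∀ p ∈ places, 0 ≤ p ∧ p.toNat < out.length) →
      (cs.foldl (pvStepA keyL)
        (PySem.Int.mod (i : Int) (PySem.List.len keyL), idx, places,
          out.map (fun o => o.getD '-'))).2.2.2
      = ((PySem.List.enumerate cs (i : Int)).foldl (pvStepB keyL)
          (idx, t, out, (places.length : Int))).2.2.1.map (fun o => o.getD '-') := by
  intro cs
  induction cs with
  | nil =>
    intro i idx places out t hok hts hlen hbnd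
    simp [PySem.List.enumerate_nil]
  | cons c cs' ih =>
    intro i idx places out t hok hts hlen hbnd
    have hKlen : 0 < keyL.length := List.length_pos_of_ne_nil hK
    have hL : 0 < (keyL.length : Int) := by exact_mod_cast hKlen
    have hplen : 0 < places.length := by
      have := hlen; simp at this; omega
    have hPL : 0 < ((places.length : Int)) := by exact_mod_cast hplen
    have hlenK : PySem.List.len keyL = (keyL.length : Int) := by simp
    have hlenP : PySem.List.len places = (places.length : Int) := by simp
    have hidxB :
        PySem.Int.mod (idx + PySem.List.pyGetD keyL (PySem.Int.mod (i : Int) (PySem.List.len keyL)) 0)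
          ((places.length : Int))
        = PySem.Int.mod (idx + PySem.List.pyGetD keyL (PySem.Int.mod (i : Int) (PySem.List.len keyL)) 0)
          (PySem.List.len places) := by rw [hlenP]
    generalize hIDX : PySem.Int.mod (idx + PySem.List.pyGetD keyL (PySem.Int.mod (i : Int) (PySem.List.len keyL)) 0) (PySem.List.len places) = idx'
    have h0 : 0 ≤ idx' := by rw [← hIDX, hlenP]; exact PySem.Int.mod_nonneg _ hPL
    have hltP : idx' < (places.length : Int) := by rw [← hIDX, hlenP]; exact PySem.Int.mod_lt _ hPL
    obtain ⟨j, hj⟩ : ∃ j : Nat, idx' = (j : Int) := ⟨idx'.toNat, (Int.toNat_of_nonneg h0).symm⟩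
    subst hj
    have hjlt : j < places.length := by exact_mod_cast hltP
    have hcnt0 : t.count = (places.length : Int) := by rw [pvTree_count_eq t hok, hts]
    obtain ⟨hjlt', hv, he, hok2, hcnt⟩ := pvPick_spec t (j : Int) hok h0 (by rw [hcnt0]; exact hltP)
    simp only [hts, Int.toNat_natCast] at hv he hjlt'
    have hpb : 0 ≤ places[j] ∧ places[j].toNat < out.length := hbnd _ (List.getElem_mem hjlt)
    -- one step of A
    have hA : pvStepA keyL
        (PySem.Int.mod (i : Int) (PySem.List.len keyL), idx, places, out.map (fun o => o.getD '-')) c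
        = (PySem.Int.mod ((i + 1 : Nat) : Int) (PySem.List.len keyL), ((j : Nat) : Int),
           places.eraseIdx j,
           (out.set places[j].toNat (some c)).map (fun o => o.getD '-')) := by
      simp only [pvStepA, hIDX]
      refine congrArg₂ Prod.mk ?_ (congrArg₂ Prod.mk rfl (congrArg₂ Prod.mk ?_ ?_))
      · rw [hlenK]; exact pvMod_succ i _ hL
      · rw [PySem.List.pop?_natCast places j hjlt]; rfl
      · have hgp : PySem.List.pyGetD places ((j : Nat) : Int) 0 = places[j] := by
          simp [List.getD_eq_getElem?_getD, hjlt]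
        rw [hgp, PySem.List.slice_to _ hpb.1,
            PySem.List.slice_from _ (by omega : (0:Int) ≤ places[j] + 1),
            show (places[j] + 1).toNat = places[j].toNat + 1 by omega,
            List.map_set]
        have hlt2 : places[j].toNat < (out.map (fun o => o.getD '-')).length := by
          simpa using hpb.2
        rw [List.append_assoc]
        exact (List.set_eq_take_cons_drop ((some c).getD '-') hlt2).symm
    -- one step of B
    have hB : pvStepB keyL (idx, t, out, (places.length : Int)) ((i : Int), c)
        = (((j : Nat) : Int), (pvPick t (j : Int)).2, out.set places[j].toNat (some c),
           ((places.eraseIdx j).length : Int)) := by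
      simp only [pvStepB, hidxB, hIDX]
      refine congrArg₂ Prod.mk rfl (congrArg₂ Prod.mk rfl (congrArg₂ Prod.mk ?_ ?_))
      · rw [hv]; exact PySem.List.pySetD_of_nonneg out (some c) hpb.1
      · rw [List.length_eraseIdx_of_lt hjlt]; omega
    rw [List.foldl_cons, hA, PySem.List.enumerate_cons, List.foldl_cons, hB]
    exact ih (i + 1) ((j : Nat) : Int) (places.eraseIdx j)
      (out.set places[j].toNat (some c)) (pvPick t (j : Int)).2 hok2 he
      (by rw [List.length_eraseIdx_of_lt hjlt]; simp at hlen; omega)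
      (by intro p hp
          have := hbnd p (List.mem_of_mem_eraseIdx hp)
          simpa using this)

lemma pvMain (data key : String) (hpre : data = "" ∨ key ≠ "") :
    humanscantsolvethis_encrypt data key = humanscantsolvethis_encrypt_alt data key := by
  by_cases hd : data = ""
  · subst hd; rcases hpre with _ | _ <;> rfl
  · have hkey : key ≠ "" := hpre.resolve_left hd
    have hdl : data.toList ≠ [] := fun h => hd (String.toList_eq_nil_iff.mp h)
    have hkl : key.toList ≠ [] := fun h => hkey (String.toList_eq_nil_iff.mp h)
    have hK : key.toList.map (fun c => (c.toNat : Int) - 64) ≠ [] := by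
      simpa using hkl
    have hn : 0 < data.toList.length := List.length_pos_of_ne_nil hdl
    have hnI : (0 : Int) < (data.toList.length : Int) := by exact_mod_cast hn
    unfold humanscantsolvethis_encrypt humanscantsolvethis_encrypt_alt
    simp only [PySem.Str.len_eq, PySem.List.pyRepeat_singleton, Int.toNat_natCast,
      PySem.List.len_eq, List.length_replicate, if_neg hn.ne']
    obtain ⟨hb1, hb2, _⟩ := pvBuild_spec 0 (data.toList.length : Int) hnI
    have hz : (0 : Int) = PySem.Int.mod ((0 : Nat) : Int)
        (PySem.List.len (key.toList.map (fun c => (c.toNat : Int) - 64))) := by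
      have hL : 0 < ((key.toList.map (fun c => (c.toNat : Int) - 64)).length : Int) := by
        have := List.length_pos_of_ne_nil hK; exact_mod_cast this
      rw [PySem.List.len_eq, PySem.Int.mod_eq_emod_of_pos hL]
      simp
    have hout : List.replicate data.toList.length '-'
        = (List.replicate data.toList.length (none : Option Char)).map (fun o => o.getD '-') := by
      simp
    rw [hz, hout]
    have := pvLoop_eq (key.toList.map (fun c => (c.toNat : Int) - 64)) hK data.toList 0 0
      (PySem.List.pyRange 0 (data.toList.length : Int) 1)
      (List.replicate data.toList.length (none : Option Char))
      (pvBuild 0 (data.toList.length : Int)) hb2 hb1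
      (by rw [PySem.List.length_pyRange_one]; omega)
      (by intro p hp
          rw [PySem.List.mem_pyRange_one] at hp
          refine ⟨hp.1, ?_⟩
          rw [List.length_replicate]; omega)
    rw [show ((PySem.List.pyRange 0 ((data.toList.length : Nat) : Int) 1).length : Int)
          = ((data.toList.length : Nat) : Int) by rw [PySem.List.length_pyRange_one]; omega] at this
    rw [show ((0:Nat) : Int) = (0 : Int) from rfl] at this
    exact congrArg String.ofList this

-- ===== VERDICT (by name: the statement is the Claim_ definition above) =====
theorem humanscantsolvethis_encrypt_spec : Claim_equal_humanscantsolvethis_encrypt := by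
  intro data key _ hpre
  exact pvMain data key hpre
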